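-- pv_equiv track=rewrite | github.com/yffi4/DevPlatform | project-service/framework_detector/framework_detector.py | _determine_primary_framework
-- ===== SOURCE A (Python) =====
-- from typing import Optional, Dict, List
--
-- def _determine_primary_framework(frameworks: List[str]) -> Optional[str]:
--     """Determine the primary framework from detected frameworks"""
--     # Priority order for frameworks (more specific first)
--     priority = [
--         "Next.js", "Nest.js", "Django", "FastAPI", "Spring Boot", "Quarkus", "Micronaut",
--         "Ruby on Rails", "Laravel", "Symfony", "ASP.NET Core",
--         "Flask", "Express", "Sinatra", "Go Fiber", "Gin", "Echo",
--         "React", "Vue.js", "Angular", ".NET"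
--     ]
--
--     for framework in priority:
--         if framework in frameworks:
--             return framework
--
--     return frameworks[0] if frameworks else None
-- ===== SOURCE B (Python) =====
-- from typing import Optional, List
--
-- _PRIORITY = [
--     "Next.js", "Nest.js", "Django", "FastAPI", "Spring Boot", "Quarkus", "Micronaut",
--     "Ruby on Rails", "Laravel", "Symfony", "ASP.NET Core",
--     "Flask", "Express", "Sinatra", "Go Fiber", "Gin", "Echo",
--     "React", "Vue.js", "Angular", ".NET"
-- ]
-- _RANK = {f: i for i, f in enumerate(_PRIORITY)}
--
--
-- def _determine_primary_framework(frameworks: List[str]) -> Optional[str]: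
--     """Single pass over the input, keeping the candidate with the best
--     (lowest) precomputed priority rank; fall back to the first input."""
--     best = None
--     for f in frameworks:
--         r = _RANK.get(f)
--         if r is not None and (best is None or r < best[0]):
--             best = (r, f)
--     if best is not None:
--         return best[1]
--     return frameworks[0] if frameworks else None
-- ===== Notes on version B (the rewrite author's own statement) =====
-- stated objective: faster
-- what changed: Instead of scanning the fixed priority list and testing membership in the input for each entry, B makes one pass over the input frameworks, looking each up in a precomputed rank table and keeping the candidate with the lowest rank.
import Mathlib
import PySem

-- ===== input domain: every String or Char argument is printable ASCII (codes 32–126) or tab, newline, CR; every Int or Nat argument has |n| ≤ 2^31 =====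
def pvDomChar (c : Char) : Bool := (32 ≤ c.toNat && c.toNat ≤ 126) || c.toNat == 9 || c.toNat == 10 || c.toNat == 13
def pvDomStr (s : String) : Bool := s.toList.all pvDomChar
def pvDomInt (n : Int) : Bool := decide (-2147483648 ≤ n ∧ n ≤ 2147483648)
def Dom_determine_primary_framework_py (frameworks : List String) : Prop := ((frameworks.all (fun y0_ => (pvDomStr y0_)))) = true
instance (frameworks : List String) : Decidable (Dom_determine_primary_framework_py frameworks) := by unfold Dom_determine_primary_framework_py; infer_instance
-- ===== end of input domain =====

-- B replaces A's scan of the priority list (membership test per entry) by a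
-- single pass over the input frameworks with a precomputed rank table (faster by a constant factor).


-- ===== PORT A =====
-- the literal `priority` list of A
def pvPriority : List String := [
    "Next.js", "Nest.js", "Django", "FastAPI", "Spring Boot", "Quarkus", "Micronaut",
    "Ruby on Rails", "Laravel", "Symfony", "ASP.NET Core",
    "Flask", "Express", "Sinatra", "Go Fiber", "Gin", "Echo",
    "React", "Vue.js", "Angular", ".NET"]

-- A's loop: `for framework in priority: if framework in frameworks: return framework`,
-- falling through to `frameworks[0] if frameworks else None`
def pvLoopA (fw : List String) : List String → Option String
  | [] => match fw with
          | [] => none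
          | x :: _ => some x
  | p :: ps => if fw.contains p then some p else pvLoopA fw ps

def determine_primary_framework_py (frameworks : List String) : Option String :=
  pvLoopA frameworks pvPriority

-- ===== PORT B =====
-- B's module-level table: _RANK = {f: i for i, f in enumerate(_PRIORITY)}
def pvRank : PySem.Dict String Int :=
  (PySem.List.enumerate pvPriority 0).foldl (fun d p => d.insert p.2 p.1) PySem.Dict.empty

-- one iteration of B's loop body: look the framework up in the rank table and
-- keep it if its rank improves on the best so far
def pvStepB (best : Option (Int × String)) (f : String) : Option (Int × String) :=
  match pvRank.get? f with
  | none => best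
  | some r =>
    match best with
    | none => some (r, f)
    | some b => if r < b.1 then some (r, f) else best

def determine_primary_framework_py_alt (frameworks : List String) : Option String :=
  match frameworks.foldl pvStepB none with
  | some b => some b.2
  | none => match frameworks with
            | [] => none
            | x :: _ => some x

-- ===== PRECONDITION & SPEC =====
def Spec_determine_primary_framework_py (frameworks : List String) (out : Option String) : Prop := out = determine_primary_framework_py_alt frameworks
instance (frameworks : List String) (out : Option String) : Decidable (Spec_determine_primary_framework_py frameworks out) := by unfold Spec_determine_primary_framework_py; infer_instance

-- ===== CLAIM (what is proved, stated in full; the proofs are below) =====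
def Claim_equal_determine_primary_framework_py : Prop := ∀ (frameworks : List String), Dom_determine_primary_framework_py frameworks → Spec_determine_primary_framework_py frameworks (determine_primary_framework_py frameworks)

-- ===== LEMMAS AND PROOFS =====

theorem pvRank_nodup : pvRank.keys.Nodup := by decide

theorem pvRank_items :
    pvRank.items = (PySem.List.enumerate pvPriority 0).map (fun p => (p.2, p.1)) := by decide

-- the rank table is exactly the (framework, index) relation of the priority list
theorem pvRank_get_iff (f : String) (r : Int) :
    pvRank.get? f = some r ↔ ∃ k : Nat, ∃ h : k < pvPriority.length, r = (k : Int) ∧ f = pvPriority[k] := by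
  rw [PySem.Dict.get?_eq_some_iff_mem_items pvRank f r pvRank_nodup, pvRank_items]
  constructor
  · intro h
    obtain ⟨⟨i, g⟩, hmem, heq⟩ := List.mem_map.mp h
    obtain ⟨k, hk, hp⟩ := (PySem.List.mem_enumerate_iff pvPriority 0 (i, g)).mp hmem
    simp only [Prod.mk.injEq] at hp heq
    exact ⟨k, hk, by rw [← heq.2, hp.1]; omega, by rw [← heq.1, hp.2]⟩
  · rintro ⟨k, hk, hr, hf⟩
    exact List.mem_map.mpr ⟨((k : Int), pvPriority[k]), (PySem.List.mem_enumerate_iff _ _ _).mpr ⟨k, hk, by simp⟩, by simp [hr, hf]⟩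

-- A's loop is find? over the priority list with the head fallback
theorem pvLoopA_eq_find (fw ps : List String) :
    pvLoopA fw ps = match ps.find? (fun p => fw.contains p) with
                    | some p => some p
                    | none => match fw with | [] => none | x :: _ => some x := by
  induction ps with
  | nil => rfl
  | cons p ps ih =>
    by_cases h : fw.contains p = true
    · rw [List.find?_cons_of_pos h]
      unfold pvLoopA; rw [h]; simp
    · rw [List.find?_cons_of_neg h]
      simp only [Bool.not_eq_true] at h
      unfold pvLoopA; rw [h, if_neg (by simp)]; exact ih

-- computation rules for one loop step of B
theorem pvStepB_no_rank (acc : Option (Int × String)) (g : String) (h : pvRank.get? g = none) :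
    pvStepB acc g = acc := by unfold pvStepB; rw [h]

theorem pvStepB_rank_none (g : String) (r : Int) (h : pvRank.get? g = some r) :
    pvStepB none g = some (r, g) := by unfold pvStepB; rw [h]

theorem pvStepB_rank_some (g : String) (r : Int) (b : Int × String) (h : pvRank.get? g = some r) :
    pvStepB (some b) g = if r < b.1 then some (r, g) else some b := by unfold pvStepB; rw [h]

-- B's fold returns none iff it started from none and no input has a rank
theorem pvFoldB_none_iff (fw : List String) (acc : Option (Int × String)) :
    fw.foldl pvStepB acc = none ↔ acc = none ∧ ∀ f ∈ fw, pvRank.get? f = none := by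
  induction fw generalizing acc with
  | nil => simp
  | cons g fw ih =>
    rw [List.foldl_cons, ih]
    have hstep : pvStepB acc g = none ↔ acc = none ∧ pvRank.get? g = none := by
      rcases hget : pvRank.get? g with _ | r
      · simp [pvStepB_no_rank acc g hget]
      · rcases acc with _ | b
        · rw [pvStepB_rank_none g r hget]
          simp
        · rw [pvStepB_rank_some g r b hget]
          constructor
          · intro h; split at h <;> exact absurd h (Option.some_ne_none _)
          · rintro ⟨h, -⟩; exact absurd h (Option.some_ne_none _)
    rw [hstep]
    simp only [List.mem_cons]
    constructor
    · rintro ⟨⟨h1, h2⟩, h3⟩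
      refine ⟨h1, ?_⟩
      rintro f (rfl | hf)
      · exact h2
      · exact h3 f hf
    · rintro ⟨h1, h2⟩
      exact ⟨⟨h1, h2 g (Or.inl rfl)⟩, fun f hf => h2 f (Or.inr hf)⟩

-- B's fold result: either the accumulator unchanged, or a ranked input element;
-- in any case it is at most every accumulator rank and every rank present in the list
theorem pvFoldB_some (fw : List String) (acc : Option (Int × String)) (r : Int) (f : String)
    (h : fw.foldl pvStepB acc = some (r, f)) :
    (acc = some (r, f) ∨ (f ∈ fw ∧ pvRank.get? f = some r)) ∧
    (∀ q : Int × String, acc = some q → r ≤ q.1) ∧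
    (∀ g ∈ fw, ∀ s : Int, pvRank.get? g = some s → r ≤ s) := by
  induction fw generalizing acc with
  | nil =>
    simp only [List.foldl_nil] at h
    refine ⟨Or.inl h, ?_, by simp⟩
    rintro q rfl
    injection h with h'
    exact le_of_eq (by rw [h'])
  | cons g fw ih =>
    rw [List.foldl_cons] at h
    obtain ⟨hsrc, hacc, hall⟩ := ih (pvStepB acc g) h
    have hstep_le : ∀ s : Int, pvRank.get? g = some s → r ≤ s := by
      intro s hs
      rcases acc with _ | b
      · exact hacc (s, g) (pvStepB_rank_none g s hs)
      · rw [pvStepB_rank_some g s b hs] at hacc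
        by_cases hlt : s < b.1
        · simpa using hacc (s, g) (by rw [if_pos hlt])
        · have := hacc b (by rw [if_neg hlt]); omega
    have hsrc' : acc = some (r, f) ∨ (f ∈ g :: fw ∧ pvRank.get? f = some r) := by
      rcases hsrc with hs | ⟨hmem, hget⟩
      · rcases hget : pvRank.get? g with _ | s
        · rw [pvStepB_no_rank acc g hget] at hs
          exact Or.inl hs
        · rcases acc with _ | b
          · rw [pvStepB_rank_none g s hget] at hs
            injection hs with hs'
            obtain ⟨h1, h2⟩ := Prod.mk.injEq .. ▸ hs'
            exact Or.inr ⟨by rw [← h2]; exact List.mem_cons_self, by rw [← h1, ← h2]; exact hget⟩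
          · rw [pvStepB_rank_some g s b hget] at hs
            split at hs
            · injection hs with hs'
              obtain ⟨h1, h2⟩ := Prod.mk.injEq .. ▸ hs'
              exact Or.inr ⟨by rw [← h2]; exact List.mem_cons_self, by rw [← h1, ← h2]; exact hget⟩
            · exact Or.inl hs
      · exact Or.inr ⟨List.mem_cons_of_mem g hmem, hget⟩
    refine ⟨hsrc', ?_, ?_⟩
    · rintro q rfl
      rcases hget : pvRank.get? g with _ | s
      · rw [pvStepB_no_rank (some q) g hget] at hacc
        exact hacc q rfl
      · rw [pvStepB_rank_some g s q hget] at hacc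
        by_cases hlt : s < q.1
        · have := hacc (s, g) (by rw [if_pos hlt])
          simp at this
          omega
        · exact hacc q (by rw [if_neg hlt])
    · intro g' hg' s hs
      rcases List.mem_cons.mp hg' with rfl | hg'
      · exact hstep_le s hs
      · exact hall g' hg' s hs

-- main equivalence
theorem pv_main (fw : List String) :
    determine_primary_framework_py fw = determine_primary_framework_py_alt fw := by
  unfold determine_primary_framework_py determine_primary_framework_py_alt
  rw [pvLoopA_eq_find]
  rcases hfind : pvPriority.find? (fun p => fw.contains p) with _ | p
  · -- no priority framework is in fw → no input framework has a rank
    have hnone : fw.foldl pvStepB none = none := by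
      rw [pvFoldB_none_iff]
      refine ⟨rfl, fun f hf => ?_⟩
      rcases hget : pvRank.get? f with _ | r
      · rfl
      · obtain ⟨k, hk, _, hfk⟩ := (pvRank_get_iff f r).mp hget
        have hnotin := List.find?_eq_none.mp hfind f (by rw [hfk]; exact List.getElem_mem hk)
        exact absurd (List.contains_iff_mem.mpr hf) (by simpa using hnotin)
    rw [hnone]
  · -- A found the first priority framework present in fw
    obtain ⟨hp, j, hj, hpj, hfirst⟩ := List.find?_eq_some_iff_getElem.mp hfind
    have hpfw : p ∈ fw := List.contains_iff_mem.mp hp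
    have hpget : pvRank.get? p = some (j : Int) :=
      (pvRank_get_iff p (j : Int)).mpr ⟨j, hj, rfl, hpj.symm⟩
    rcases hfold : fw.foldl pvStepB none with _ | b
    · exact absurd ((pvFoldB_none_iff fw none).mp hfold |>.2 p hpfw) (by simp [hpget])
    · obtain ⟨r, f⟩ := b
      obtain ⟨hsrc, -, hall⟩ := pvFoldB_some fw none r f hfold
      rcases hsrc with hs | ⟨hmem, hget⟩
      · exact absurd hs (by simp)
      · -- f = pvPriority[k] with r = k; minimality both ways gives k = j, f = p
        obtain ⟨k, hk, hr, hfk⟩ := (pvRank_get_iff f r).mp hget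
        have hrj : r ≤ (j : Int) := hall p hpfw (j : Int) hpget
        have hjk : ¬ k < j := by
          intro hlt
          have h1 := hfirst k hlt
          rw [← hfk] at h1
          rw [List.contains_iff_mem.mpr hmem] at h1
          simp at h1
        have hkj : k = j := by omega
        subst hkj
        rw [hfk, hpj]

-- ===== VERDICT (by name: the statement is the Claim_ definition above) =====
theorem determine_primary_framework_py_spec : Claim_equal_determine_primary_framework_py := by
  intro fw _
  unfold Spec_determine_primary_framework_py
  exact pv_main fw
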